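-- pv_equiv track=rewrite | github.com/juvelop17/problem_solving | Codeforces/#690_DIV3/C.py | find
-- ===== SOURCE A (Python) =====
-- def find(cursum, curdigit, curnum):
--     if cursum == 0:
--         return curnum
--     if curdigit == 0:
--         return -1
--
--     if cursum < curdigit:
--         nextdigit = cursum
--     else:
--         nextdigit = curdigit - 1
--
--     return find(cursum - nextdigit, nextdigit, curnum * 10 + nextdigit)
-- ===== SOURCE B (Python) =====
-- def find(cursum, curdigit, curnum):
--     while cursum != 0:
--         if curdigit == 0:
--             return -1
--         nextdigit = cursum if cursum < curdigit else curdigit - 1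
--         curnum = curnum * 10 + nextdigit
--         cursum -= nextdigit
--         curdigit = nextdigit
--     return curnum
-- ===== Notes on version B (the rewrite author's own statement) =====
-- stated objective: simpler
-- what changed: the tail recursion is flattened into an explicit while loop that mutates cursum/curdigit/curnum in place, with the same guard order
import Mathlib
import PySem

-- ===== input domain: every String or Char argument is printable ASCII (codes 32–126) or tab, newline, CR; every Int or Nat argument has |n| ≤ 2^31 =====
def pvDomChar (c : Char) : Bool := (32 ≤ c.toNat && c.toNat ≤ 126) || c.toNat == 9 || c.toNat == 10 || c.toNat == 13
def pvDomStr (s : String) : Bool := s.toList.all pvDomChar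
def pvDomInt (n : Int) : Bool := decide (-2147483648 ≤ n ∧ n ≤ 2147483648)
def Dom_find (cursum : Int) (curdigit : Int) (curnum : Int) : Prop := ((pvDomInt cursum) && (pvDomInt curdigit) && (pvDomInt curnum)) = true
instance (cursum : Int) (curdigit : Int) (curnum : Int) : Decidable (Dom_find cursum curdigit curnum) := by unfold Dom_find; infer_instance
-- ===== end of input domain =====

-- B: the same greedy digit choice, but the tail recursion is flattened into an explicit
-- while loop over local state (simpler decomposition; same values, same guard order).
-- Pre_find excludes exactly the inputs on which the Python A never returns (infinite recursion).

-- ===== PORT A =====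
-- A's tail recursion, with a fuel guard that only makes it total in Lean;
-- on every input satisfying Pre_find the fuel is never exhausted.
def findRec : Nat → Int → Int → Int → Int
  | 0, _, _, curnum => curnum
  | fuel+1, cursum, curdigit, curnum =>
    if cursum = 0 then curnum
    else if curdigit = 0 then -1
    else
      let nextdigit := if cursum < curdigit then cursum else curdigit - 1
      findRec fuel (cursum - nextdigit) nextdigit (curnum * 10 + nextdigit)

def find (cursum : Int) (curdigit : Int) (curnum : Int) : Int :=
  findRec (cursum.toNat + 3) cursum curdigit curnum

-- ===== PORT B =====
-- one iteration of Source B's while loop: either the updated (cursum, curdigit, curnum) state,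
-- or the returned value (loop exit / early return -1)
def findStep (st : Int × Int × Int) : (Int × Int × Int) ⊕ Int :=
  match st with
  | (s, d, n) =>
    if s = 0 then Sum.inr n
    else if d = 0 then Sum.inr (-1)
    else
      let nd : Int := if s < d then s else d - 1
      Sum.inl (s - nd, nd, n * 10 + nd)

-- drive the loop; the Nat bound only makes it total in Lean (never reached under Pre_find)
def findLoop : Nat → (Int × Int × Int) → Int
  | 0, (_, _, n) => n
  | k+1, st =>
    match findStep st with
    | Sum.inr r => r
    | Sum.inl st2 => findLoop k st2

def find_alt (cursum : Int) (curdigit : Int) (curnum : Int) : Int :=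
  findLoop (cursum.toNat + 3) (cursum, curdigit, curnum)

-- ===== PRECONDITION & SPEC =====
-- Pre_find is exactly the set of inputs on which the Python A returns: outside it
-- (cursum ≠ 0, curdigit < 0, cursum ≥ curdigit) the recursion grows cursum forever.
def Pre_find (cursum : Int) (curdigit : Int) (curnum : Int) : Prop :=
  cursum = 0 ∨ 0 ≤ curdigit ∨ cursum < curdigit
instance (cursum : Int) (curdigit : Int) (curnum : Int) : Decidable (Pre_find cursum curdigit curnum) := by unfold Pre_find; infer_instance
def pvWitness_find : Int × Int × Int := (20, 10, 0)

def Spec_find (cursum : Int) (curdigit : Int) (curnum : Int) (out : Int) : Prop := out = find_alt cursum curdigit curnum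
instance (cursum : Int) (curdigit : Int) (curnum : Int) (out : Int) : Decidable (Spec_find cursum curdigit curnum out) := by unfold Spec_find; infer_instance

-- ===== CLAIM (what is proved, stated in full; the proofs are below) =====
def Claim_equal_find : Prop := ∀ (cursum : Int) (curdigit : Int) (curnum : Int), Dom_find cursum curdigit curnum → Pre_find cursum curdigit curnum → Spec_find cursum curdigit curnum (find cursum curdigit curnum)

-- ===== LEMMAS AND PROOFS =====

-- the fueled recursion and the fueled loop take identical steps
theorem findRec_eq_findLoop (fuel : Nat) :
    ∀ (s d n : Int), findRec fuel s d n = findLoop fuel (s, d, n) := by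
  induction fuel with
  | zero => intro s d n; rfl
  | succ k ih =>
    intro s d n
    simp only [findRec, findLoop, findStep]
    split_ifs with h1 h2 <;> simp [ih]

-- ===== VERDICT (by name: the statement is the Claim_ definition above) =====
theorem find_spec : Claim_equal_find := by
  intro cursum curdigit curnum _ _
  unfold Spec_find find find_alt
  exact findRec_eq_findLoop _ cursum curdigit curnum
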